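-- pv_equiv track=rewrite | github.com/utaoutau/mtproto-zig-build | src/ctl/dashboard_assets/server.py | _set_toml_key
-- ===== SOURCE A (Python) =====
-- def _set_toml_key(
--     lines: list[str],
--     section_header: str,
--     key: str,
--     value_literal: str,
-- ) -> list[str]:
--     section_l = section_header.strip().lower()
--     key_l = key.strip().lower()
--
--     in_section = False
--     section_found = False
--     insert_idx = None
--
--     for i, line in enumerate(lines):
--         stripped = line.strip()
--         if stripped.startswith("[") and stripped.endswith("]"):
--             if in_section and insert_idx is None:
--                 insert_idx = i
--             in_section = stripped.lower() == section_l
--             if in_section: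
--                 section_found = True
--                 insert_idx = i + 1
--             continue
--
--         if not in_section:
--             continue
--
--         if not stripped or stripped.startswith("#") or stripped.startswith(";"):
--             continue
--
--         if "=" not in stripped:
--             continue
--
--         key_part = stripped.split("=", 1)[0].strip().lower()
--         if key_part != key_l:
--             continue
--
--         indent_len = len(line) - len(line.lstrip(" \t"))
--         indent = line[:indent_len]
--         lines[i] = f"{indent}{key} = {value_literal}\n"
--         return lines
--
--     if section_found:
--         if insert_idx is None:
--             insert_idx = len(lines)
--         lines.insert(insert_idx, f"{key} = {value_literal}\n")
--         return lines
--
--     if lines and not lines[-1].endswith("\n"):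
--         lines[-1] += "\n"
--     if lines and lines[-1].strip():
--         lines.append("\n")
--
--     lines.append(f"{section_header}\n")
--     lines.append(f"{key} = {value_literal}\n")
--     return lines
-- ===== SOURCE B (Python) =====
-- # B: parse the document into (preamble, [(header, block), ...]), transform that
-- # structure (replace key in the first matching section containing it, else insert
-- # at the front of the last matching section's block), then flatten; the
-- # section-absent append path is unchanged.  B returns a new list (A mutates
-- # `lines` in place); the equivalence is about the return value.
--
-- def _is_hdr(stripped):
--     return stripped.startswith("[") and stripped.endswith("]")
--
--
-- def _is_cand(key_l, line):
--     stripped = line.strip()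
--     return (stripped != ""
--             and not stripped.startswith("#")
--             and not stripped.startswith(";")
--             and "=" in stripped
--             and stripped.split("=", 1)[0].strip().lower() == key_l)
--
--
-- def _split_sections(lines):
--     pre, secs = [], []
--     for line in lines:
--         if _is_hdr(line.strip()):
--             secs.append((line, []))
--         elif secs:
--             secs[-1][1].append(line)
--         else:
--             pre.append(line)
--     return pre, secs
--
--
-- def _replace_key(block, key_l, key, value_literal):
--     for i, line in enumerate(block):
--         if _is_cand(key_l, line):
--             indent = line[: len(line) - len(line.lstrip(" \t"))]
--             return block[:i] + [f"{indent}{key} = {value_literal}\n"] + block[i + 1:]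
--     return None
--
--
-- def _flatten(secs):
--     return [x for (h, b) in secs for x in [h] + b]
--
--
-- def _set_toml_key(
--     lines: list[str],
--     section_header: str,
--     key: str,
--     value_literal: str,
-- ) -> list[str]:
--     section_l = section_header.strip().lower()
--     key_l = key.strip().lower()
--     new_line = f"{key} = {value_literal}\n"
--
--     pre, secs = _split_sections(lines)
--
--     # phase 1: rewrite the key line in the first matching section containing it
--     for i, (h, block) in enumerate(secs):
--         if h.strip().lower() == section_l:
--             nb = _replace_key(block, key_l, key, value_literal)
--             if nb is not None:
--                 return pre + _flatten(secs[:i] + [(h, nb)] + secs[i + 1:])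
--
--     # phase 2: key absent -> insert right after the last matching header
--     rsecs = list(reversed(secs))
--     for i, (h, block) in enumerate(rsecs):
--         if h.strip().lower() == section_l:
--             rsecs[i] = (h, [new_line] + block)
--             return pre + _flatten(list(reversed(rsecs)))
--
--     # phase 3: section absent -> append it at the end (same padding as before)
--     out = list(lines)
--     if out and not out[-1].endswith("\n"):
--         out[-1] = out[-1] + "\n"
--     if out and out[-1].strip():
--         out.append("\n")
--     out.append(f"{section_header}\n")
--     out.append(new_line)
--     return out
-- ===== Notes on version B (the rewrite author's own statement) =====
-- stated objective: alternative
-- what changed: A is a one-pass state machine (in_section/section_found/insert_idx) over the raw lines; B first parses the document into (preamble, [(header, block), ...]), then transforms that structure - replace the key in the first matching section that contains it, else cons the new line onto the last matching section's block - and flattens it back; the section-absent append path is unchanged.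
import Mathlib
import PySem

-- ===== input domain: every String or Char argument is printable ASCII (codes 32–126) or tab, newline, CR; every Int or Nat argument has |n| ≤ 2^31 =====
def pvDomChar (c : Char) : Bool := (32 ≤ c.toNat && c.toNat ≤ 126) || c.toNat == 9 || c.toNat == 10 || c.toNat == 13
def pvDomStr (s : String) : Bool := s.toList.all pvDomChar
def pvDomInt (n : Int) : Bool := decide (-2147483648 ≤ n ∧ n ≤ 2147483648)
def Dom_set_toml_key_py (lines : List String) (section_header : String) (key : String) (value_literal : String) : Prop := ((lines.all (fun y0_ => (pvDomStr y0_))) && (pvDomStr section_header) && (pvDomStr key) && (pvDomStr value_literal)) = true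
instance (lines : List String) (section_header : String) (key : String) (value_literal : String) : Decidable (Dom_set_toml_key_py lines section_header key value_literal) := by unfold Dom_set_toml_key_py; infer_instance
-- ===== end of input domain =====

-- B parses the document into (preamble, sections) and transforms that structure instead of
-- running A's one-pass state machine; equivalence is about the RETURN value only (A mutates
-- `lines` in place, B builds a new list).


-- ===== PORT A =====

-- hand port (exact): indent = line[: len(line) - len(line.lstrip(" \t"))], i.e. the maximal
-- leading run of ' '/'\t' characters of the line
def pvIndent (line : String) : String :=
  String.ofList (line.toList.takeWhile (fun c => c == ' ' || c == '\t'))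

-- stripped.split("=", 1)[0]; the .getD/.headD defaults are unreachable (sep ≠ "" and
-- Python's split always returns at least one piece)
def pvKeyPart (st : String) : String :=
  ((PySem.Str.splitMax? st "=" 1).getD []).headD ""

-- the code after A's loop: `if section_found: … insert …` else the append-at-end path
def pvAfterA (lines : List String) (found : Bool) (ins : Option Nat)
    (section_header key value_literal : String) : List String :=
  if found then
    PySem.List.insert lines ((ins.getD lines.length : Nat) : Int) (key ++ " = " ++ value_literal ++ "\n")
  else
    let l1 := match lines.getLast? with
      | none => lines
      | some last => if PySem.Str.endswith last "\n" then lines else lines.dropLast ++ [last ++ "\n"]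
    let l2 := match l1.getLast? with
      | none => l1
      | some last => if PySem.Str.strip last == "" then l1 else l1 ++ ["\n"]
    l2 ++ [section_header ++ "\n", key ++ " = " ++ value_literal ++ "\n"]

-- A's `for i, line in enumerate(lines)` loop; pref holds the already-scanned lines reversed
-- (the list is mutated only at the point of return, so carrying the prefix is exact)
def pvLoopA (sec keyl key value header : String) (pref : List String) (rest : List String)
    (i : Nat) (inSec found : Bool) (ins : Option Nat) : List String :=
  match rest with
  | [] => pvAfterA pref.reverse found ins header key value
  | line :: tl =>
    let st := PySem.Str.strip line
    if PySem.Str.startswith st "[" && PySem.Str.endswith st "]" then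
      let ins1 := if inSec && ins.isNone then some i else ins
      let inSec' := PySem.Str.lower st == sec
      let found' := found || inSec'
      let ins' := if inSec' then some (i + 1) else ins1
      pvLoopA sec keyl key value header (line :: pref) tl (i + 1) inSec' found' ins'
    else if !inSec then
      pvLoopA sec keyl key value header (line :: pref) tl (i + 1) inSec found ins
    else if st == "" || PySem.Str.startswith st "#" || PySem.Str.startswith st ";" then
      pvLoopA sec keyl key value header (line :: pref) tl (i + 1) inSec found ins
    else if !(PySem.Str.isIn "=" st) then
      pvLoopA sec keyl key value header (line :: pref) tl (i + 1) inSec found ins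
    else if !(PySem.Str.lower (PySem.Str.strip (pvKeyPart st)) == keyl) then
      pvLoopA sec keyl key value header (line :: pref) tl (i + 1) inSec found ins
    else
      pref.reverse ++ [pvIndent line ++ key ++ " = " ++ value ++ "\n"] ++ tl

def set_toml_key_py (lines : List String) (section_header : String) (key : String) (value_literal : String) : List String :=
  let sec := PySem.Str.lower (PySem.Str.strip section_header)
  let keyl := PySem.Str.lower (PySem.Str.strip key)
  pvLoopA sec keyl key value_literal section_header [] lines 0 false false none

-- ===== PORT B =====

def pvIsHdr (st : String) : Bool :=
  PySem.Str.startswith st "[" && PySem.Str.endswith st "]"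

def pvCand (keyl line : String) : Bool :=
  let st := PySem.Str.strip line
  !(st == "") && !(PySem.Str.startswith st "#") && !(PySem.Str.startswith st ";")
    && PySem.Str.isIn "=" st
    && (PySem.Str.lower (PySem.Str.strip (pvKeyPart st)) == keyl)

-- _split_sections loop; the accumulator keeps the sections reversed (sections[-1] = head)
def pvStep (acc : List String × List (String × List String)) (line : String) :
    List String × List (String × List String) :=
  if pvIsHdr (PySem.Str.strip line) then (acc.1, (line, []) :: acc.2)
  else match acc.2 with
    | [] => (acc.1 ++ [line], [])
    | (h, b) :: r => (acc.1, (h, b ++ [line]) :: r)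

def pvSplitB (lines : List String) : List String × List (String × List String) :=
  let acc := lines.foldl pvStep ([], [])
  (acc.1, acc.2.reverse)

-- _replace_key: block[:i] + [new line] + block[i+1:] at the first candidate, else None
def pvRepKey (keyl key value : String) : List String → Option (List String)
  | [] => none
  | line :: tl =>
    if pvCand keyl line then some ((pvIndent line ++ key ++ " = " ++ value ++ "\n") :: tl)
    else (pvRepKey keyl key value tl).map (line :: ·)

-- phase 1 loop over secs
def pvPhase1 (sec keyl key value : String) : List (String × List String) → Option (List (String × List String))
  | [] => none
  | (h, b) :: tl =>
    if PySem.Str.lower (PySem.Str.strip h) == sec then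
      match pvRepKey keyl key value b with
      | some nb => some ((h, nb) :: tl)
      | none => (pvPhase1 sec keyl key value tl).map ((h, b) :: ·)
    else (pvPhase1 sec keyl key value tl).map ((h, b) :: ·)

-- phase 2 loop over list(reversed(secs))
def pvPhase2Rev (sec newline : String) : List (String × List String) → Option (List (String × List String))
  | [] => none
  | (h, b) :: tl =>
    if PySem.Str.lower (PySem.Str.strip h) == sec then some ((h, newline :: b) :: tl)
    else (pvPhase2Rev sec newline tl).map ((h, b) :: ·)

def pvFlatten (secs : List (String × List String)) : List String :=
  secs.flatMap (fun s => s.1 :: s.2)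

def set_toml_key_py_alt (lines : List String) (section_header : String) (key : String) (value_literal : String) : List String :=
  let sec := PySem.Str.lower (PySem.Str.strip section_header)
  let keyl := PySem.Str.lower (PySem.Str.strip key)
  let newline := key ++ " = " ++ value_literal ++ "\n"
  let ps := pvSplitB lines
  match pvPhase1 sec keyl key value_literal ps.2 with
  | some s2 => ps.1 ++ pvFlatten s2
  | none =>
    match pvPhase2Rev sec newline ps.2.reverse with
    | some r => ps.1 ++ pvFlatten r.reverse
    | none => pvAfterA lines false none section_header key value_literal

-- ===== PRECONDITION & SPEC =====
def Spec_set_toml_key_py (lines : List String) (section_header : String) (key : String) (value_literal : String) (out : List String) : Prop := out = set_toml_key_py_alt lines section_header key value_literal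
instance (lines : List String) (section_header : String) (key : String) (value_literal : String) (out : List String) : Decidable (Spec_set_toml_key_py lines section_header key value_literal out) := by unfold Spec_set_toml_key_py; infer_instance

-- ===== CLAIM (what is proved, stated in full; the proofs are below) =====
def Claim_equal_set_toml_key_py : Prop := ∀ (lines : List String) (section_header : String) (key : String) (value_literal : String), Dom_set_toml_key_py lines section_header key value_literal → Spec_set_toml_key_py lines section_header key value_literal (set_toml_key_py lines section_header key value_literal)

-- ===== LEMMAS AND PROOFS =====

-- front-recursive characterisation of _split_sections
def pvSplitRec : List String → List String × List (String × List String)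
  | [] => ([], [])
  | l :: tl =>
    let r := pvSplitRec tl
    if pvIsHdr (PySem.Str.strip l) then ([], (l, r.1) :: r.2) else (l :: r.1, r.2)

-- insert after the LAST matching header, front-recursively
def pvInsLast (sec newline : String) : List (String × List String) → Option (List (String × List String))
  | [] => none
  | (h, b) :: tl =>
    match pvInsLast sec newline tl with
    | some r => some ((h, b) :: r)
    | none =>
      if PySem.Str.lower (PySem.Str.strip h) == sec then some ((h, newline :: b) :: tl) else none

-- what A's loop computes, phrased over the split of the unscanned suffix
def pvG (sec keyl key value header : String) (pl : List String) (ins : Option Nat)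
    (inSec found : Bool) (rest : List String) : List String :=
  let s := pvSplitRec rest
  match (if inSec then pvRepKey keyl key value s.1 else none) with
  | some nb => pl ++ nb ++ pvFlatten s.2
  | none =>
    match pvPhase1 sec keyl key value s.2 with
    | some s2 => pl ++ s.1 ++ pvFlatten s2
    | none =>
      match pvInsLast sec (key ++ " = " ++ value ++ "\n") s.2 with
      | some s2 => pl ++ s.1 ++ pvFlatten s2
      | none => pvAfterA (pl ++ rest) found ins header key value

lemma pvSplitRec_join (ls : List String) :
    (pvSplitRec ls).1 ++ pvFlatten (pvSplitRec ls).2 = ls := by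
  induction ls with
  | nil => simp [pvSplitRec, pvFlatten]
  | cons l tl ih =>
    simp only [pvSplitRec]
    split_ifs with h
    · simpa [pvFlatten] using ih
    · simpa [pvFlatten] using ih

lemma pvFold_cons (ls : List String) : ∀ (pre : List String) (h : String) (b : List String)
    (r : List (String × List String)),
    List.foldl pvStep (pre, (h, b) :: r) ls
      = (pre, (pvSplitRec ls).2.reverse ++ (h, b ++ (pvSplitRec ls).1) :: r) := by
  induction ls with
  | nil => intro pre h b r; simp [pvSplitRec]
  | cons l tl ih =>
    intro pre h b r
    simp only [List.foldl_cons, pvStep, pvSplitRec]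
    split_ifs with hh
    · simp [ih]
    · simp [ih]

lemma pvFold_nil (ls : List String) : ∀ (pre : List String),
    List.foldl pvStep (pre, []) ls
      = (pre ++ (pvSplitRec ls).1, (pvSplitRec ls).2.reverse) := by
  induction ls with
  | nil => intro pre; simp [pvSplitRec]
  | cons l tl ih =>
    intro pre
    simp only [List.foldl_cons, pvStep, pvSplitRec]
    split_ifs with hh
    · simp [pvFold_cons]
    · simp [ih]

lemma pvSplitB_eq (ls : List String) : pvSplitB ls = pvSplitRec ls := by
  simp [pvSplitB, pvFold_nil]

lemma pvPhase2Rev_append (sec nl : String) (xs ys : List (String × List String)) :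
    pvPhase2Rev sec nl (xs ++ ys)
      = match pvPhase2Rev sec nl xs with
        | some r => some (r ++ ys)
        | none => (pvPhase2Rev sec nl ys).map (xs ++ ·) := by
  induction xs with
  | nil => cases hy : pvPhase2Rev sec nl ys <;> simp [pvPhase2Rev, hy]
  | cons s tl ih =>
    obtain ⟨h, b⟩ := s
    simp only [List.cons_append, pvPhase2Rev]
    split_ifs with hh
    · simp
    · rw [ih]
      cases pvPhase2Rev sec nl tl <;> cases pvPhase2Rev sec nl ys <;> simp

lemma pvPhase2Rev_reverse (sec nl : String) (secs : List (String × List String)) :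
    pvPhase2Rev sec nl secs.reverse = (pvInsLast sec nl secs).map List.reverse := by
  induction secs with
  | nil => simp [pvPhase2Rev, pvInsLast]
  | cons s tl ih =>
    obtain ⟨h, b⟩ := s
    rw [List.reverse_cons, pvPhase2Rev_append, ih]
    simp only [pvInsLast]
    cases hins : pvInsLast sec nl tl with
    | some r => simp
    | none =>
      simp only [Option.map_none]
      simp only [pvPhase2Rev]
      split_ifs with hh <;> simp

-- pvG step: a non-header line that is skipped (outside the section, or not a key candidate)
lemma pvG_step_skip (sec keyl key value header : String) (pl : List String) (ins : Option Nat)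
    (inSec found : Bool) (line : String) (tl : List String)
    (hh : pvIsHdr (PySem.Str.strip line) = false)
    (hc : inSec = true → pvCand keyl line = false) :
    pvG sec keyl key value header pl ins inSec found (line :: tl)
      = pvG sec keyl key value header (pl ++ [line]) ins inSec found tl := by
  cases hsec : inSec
  · simp only [pvG, pvSplitRec, hh, Bool.false_eq_true, if_false, Bool.false_eq_true]
    cases h1 : pvPhase1 sec keyl key value (pvSplitRec tl).2 <;>
      cases h2 : pvInsLast sec (key ++ " = " ++ value ++ "\n") (pvSplitRec tl).2 <;>
        simp [*, pvFlatten]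
  · have hc' := hc hsec
    simp only [pvG, pvSplitRec, hh, Bool.false_eq_true, if_false, if_true, pvRepKey, hc']
    cases hr : pvRepKey keyl key value (pvSplitRec tl).1 <;>
      cases h1 : pvPhase1 sec keyl key value (pvSplitRec tl).2 <;>
        cases h2 : pvInsLast sec (key ++ " = " ++ value ++ "\n") (pvSplitRec tl).2 <;>
          simp [*, pvFlatten]

-- pvG step: a header line that does not name the section
lemma pvG_step_hdr_nomatch (sec keyl key value header : String) (pl : List String)
    (ins : Option Nat) (inSec found : Bool) (line : String) (tl : List String)
    (hh : pvIsHdr (PySem.Str.strip line) = true)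
    (hm : (PySem.Str.lower (PySem.Str.strip line) == sec) = false) :
    pvG sec keyl key value header pl ins inSec found (line :: tl)
      = pvG sec keyl key value header (pl ++ [line]) ins false found tl := by
  simp only [pvG, pvSplitRec, hh, if_true, pvPhase1, pvInsLast, hm, pvRepKey, ite_self,
    Bool.false_eq_true, if_false]
  cases h1 : pvPhase1 sec keyl key value (pvSplitRec tl).2 <;>
    cases h2 : pvInsLast sec (key ++ " = " ++ value ++ "\n") (pvSplitRec tl).2 <;>
      simp [*, pvFlatten]

-- pvG step: a header line naming the section
lemma pvG_step_hdr_match (sec keyl key value header : String) (pl : List String)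
    (ins : Option Nat) (inSec found : Bool) (line : String) (tl : List String)
    (hh : pvIsHdr (PySem.Str.strip line) = true)
    (hm : (PySem.Str.lower (PySem.Str.strip line) == sec) = true) :
    pvG sec keyl key value header pl ins inSec found (line :: tl)
      = pvG sec keyl key value header (pl ++ [line]) (some (pl.length + 1)) true true tl := by
  have hins : PySem.List.insert (pl ++ line :: tl) (((pl.length + 1 : Nat) : Int))
      (key ++ " = " ++ value ++ "\n") = pl ++ line :: (key ++ " = " ++ value ++ "\n") :: tl := by
    rw [show (pl ++ line :: tl) = (pl ++ [line]) ++ tl by simp]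
    rw [PySem.List.insert_natCast _ _ _ (by simp)]
    rw [List.take_left' (by simp), List.drop_left' (by simp)]
    simp
  have htl := pvSplitRec_join tl
  simp only [pvG, pvSplitRec, hh, if_true, pvPhase1, pvInsLast, hm, pvRepKey, ite_self]
  cases hr : pvRepKey keyl key value (pvSplitRec tl).1 <;>
    cases h1 : pvPhase1 sec keyl key value (pvSplitRec tl).2 <;>
      cases h2 : pvInsLast sec (key ++ " = " ++ value ++ "\n") (pvSplitRec tl).2 <;>
        simp [*, pvFlatten, pvAfterA]
  simp only [pvFlatten] at htl
  rw [htl, show ((pl.length : Int) + 1) = (((pl.length + 1 : Nat)) : Int) by push_cast; ring, hins]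

-- pvG: a candidate key line inside the section terminates the scan
lemma pvG_step_cand (sec keyl key value header : String) (pl : List String) (ins : Option Nat)
    (found : Bool) (line : String) (tl : List String)
    (hh : pvIsHdr (PySem.Str.strip line) = false)
    (hc : pvCand keyl line = true) :
    pvG sec keyl key value header pl ins true found (line :: tl)
      = pl ++ [pvIndent line ++ key ++ " = " ++ value ++ "\n"] ++ tl := by
  simp only [pvG, pvSplitRec, hh, Bool.false_eq_true, if_false, if_true, pvRepKey, hc]
  conv_rhs => rw [← pvSplitRec_join tl]
  simp [pvFlatten]

-- the master invariant for A's loop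
lemma pvLoopA_eq_G (sec keyl key value header : String) :
    ∀ (rest pref : List String) (i : Nat) (inSec found : Bool) (ins : Option Nat),
    i = pref.length → (inSec = true → ins.isSome) →
    pvLoopA sec keyl key value header pref rest i inSec found ins
      = pvG sec keyl key value header pref.reverse ins inSec found rest := by
  intro rest
  induction rest with
  | nil =>
    intro pref i inSec found ins hi hs
    simp [pvLoopA, pvG, pvSplitRec, pvRepKey, pvPhase1, pvInsLast]
  | cons line tl ih =>
    intro pref i inSec found ins hi hs
    have hins1 : (if inSec && ins.isNone then some i else ins) = ins := by
      cases hsec : inSec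
      · simp
      · have := hs hsec
        cases ins
        · simp at this
        · simp
    by_cases hh : pvIsHdr (PySem.Str.strip line) = true
    · -- header line
      by_cases hm : (PySem.Str.lower (PySem.Str.strip line) == sec) = true
      · rw [show pvLoopA sec keyl key value header pref (line :: tl) i inSec found ins
              = pvLoopA sec keyl key value header (line :: pref) tl (i + 1) true true
                  (some (i + 1)) by
            simp only [pvLoopA, pvIsHdr] at hh ⊢
            rw [hh, hins1, hm]
            simp]
        rw [ih (line :: pref) (i + 1) true true (some (i + 1)) (by simp [hi]) (by simp)]
        rw [pvG_step_hdr_match sec keyl key value header pref.reverse ins inSec found line tl hh hm]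
        simp [hi]
      · rw [show pvLoopA sec keyl key value header pref (line :: tl) i inSec found ins
              = pvLoopA sec keyl key value header (line :: pref) tl (i + 1) false found ins by
            simp only [pvLoopA, pvIsHdr] at hh ⊢
            rw [hh, hins1]
            simp only [Bool.not_eq_true] at hm
            rw [hm]
            simp]
        rw [ih (line :: pref) (i + 1) false found ins (by simp [hi]) (by simp)]
        rw [pvG_step_hdr_nomatch sec keyl key value header pref.reverse ins inSec found line tl hh
          (by simpa using hm)]
        simp
    · -- not a header line
      have hh' : pvIsHdr (PySem.Str.strip line) = false := by simpa using hh
      cases hsec : inSec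
      · -- not in section: skipped
        rw [show pvLoopA sec keyl key value header pref (line :: tl) i false found ins
              = pvLoopA sec keyl key value header (line :: pref) tl (i + 1) false found ins by
            simp only [pvLoopA, pvIsHdr] at hh' ⊢
            rw [hh']
            simp]
        rw [ih (line :: pref) (i + 1) false found ins (by simp [hi]) (by simp)]
        rw [pvG_step_skip sec keyl key value header pref.reverse ins false found line tl hh'
          (by simp)]
        simp
      · -- in the section: follow A's three skip tests
        by_cases c3 : (PySem.Str.strip line == "" || PySem.Str.startswith (PySem.Str.strip line) "#"
            || PySem.Str.startswith (PySem.Str.strip line) ";") = true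
        · have hc' : pvCand keyl line = false := by
            have := c3
            simp only [Bool.or_eq_true] at this
            simp only [pvCand]
            rcases this with (h | h) | h <;>
              simp only [h, Bool.not_true, Bool.false_and, Bool.and_false]
          rw [show pvLoopA sec keyl key value header pref (line :: tl) i true found ins
                = pvLoopA sec keyl key value header (line :: pref) tl (i + 1) true found ins by
              simp only [pvLoopA, pvIsHdr] at hh' ⊢
              rw [hh', c3]
              simp]
          rw [ih (line :: pref) (i + 1) true found ins (by simp [hi]) (fun _ => hs hsec)]
          rw [pvG_step_skip sec keyl key value header pref.reverse ins true found line tl hh'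
            (fun _ => hc')]
          simp
        · have c3' := c3
          simp only [Bool.or_eq_true, not_or, Bool.not_eq_true] at c3'
          by_cases c4 : PySem.Str.isIn "=" (PySem.Str.strip line) = true
          · by_cases c5 : (PySem.Str.lower (PySem.Str.strip (pvKeyPart (PySem.Str.strip line)))
                == keyl) = true
            · -- candidate: the loop returns here
              have hc : pvCand keyl line = true := by
                simp only [pvCand]
                rw [c3'.1.1, c3'.1.2, c3'.2, c4, c5]
                rfl
              rw [show pvLoopA sec keyl key value header pref (line :: tl) i true found ins
                    = pref.reverse ++ [pvIndent line ++ key ++ " = " ++ value ++ "\n"] ++ tl by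
                  simp only [pvLoopA, pvIsHdr] at hh' ⊢
                  rw [hh', c3'.1.1, c3'.1.2, c3'.2, c4, c5]
                  simp]
              rw [pvG_step_cand sec keyl key value header pref.reverse ins found line tl hh' hc]
            · have c5' : (PySem.Str.lower (PySem.Str.strip (pvKeyPart (PySem.Str.strip line)))
                  == keyl) = false := by simpa using c5
              have hc' : pvCand keyl line = false := by
                simp only [pvCand, c5', Bool.and_false]
              rw [show pvLoopA sec keyl key value header pref (line :: tl) i true found ins
                    = pvLoopA sec keyl key value header (line :: pref) tl (i + 1) true found ins by
                  simp only [pvLoopA, pvIsHdr] at hh' ⊢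
                  rw [hh', c3'.1.1, c3'.1.2, c3'.2, c4, c5']
                  simp]
              rw [ih (line :: pref) (i + 1) true found ins (by simp [hi]) (fun _ => hs hsec)]
              rw [pvG_step_skip sec keyl key value header pref.reverse ins true found line tl hh'
                (fun _ => hc')]
              simp
          · have c4' : PySem.Str.isIn "=" (PySem.Str.strip line) = false := by simpa using c4
            have hc' : pvCand keyl line = false := by
              simp only [pvCand, c4', Bool.and_false, Bool.false_and]
            rw [show pvLoopA sec keyl key value header pref (line :: tl) i true found ins
                  = pvLoopA sec keyl key value header (line :: pref) tl (i + 1) true found ins by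
                simp only [pvLoopA, pvIsHdr] at hh' ⊢
                rw [hh', c3'.1.1, c3'.1.2, c3'.2, c4']
                simp]
            rw [ih (line :: pref) (i + 1) true found ins (by simp [hi]) (fun _ => hs hsec)]
            rw [pvG_step_skip sec keyl key value header pref.reverse ins true found line tl hh'
              (fun _ => hc')]
            simp

-- ===== VERDICT (by name: the statement is the Claim_ definition above) =====
theorem set_toml_key_py_spec : Claim_equal_set_toml_key_py := by
  intro lines section_header key value_literal _
  unfold Spec_set_toml_key_py
  simp only [set_toml_key_py, set_toml_key_py_alt]
  rw [pvLoopA_eq_G _ _ _ _ _ lines [] 0 false false none rfl (by simp)]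
  rw [pvSplitB_eq, pvPhase2Rev_reverse]
  simp only [pvG, List.reverse_nil, Bool.false_eq_true, if_false]
  cases h1 : pvPhase1 (PySem.Str.lower (PySem.Str.strip section_header))
      (PySem.Str.lower (PySem.Str.strip key)) key value_literal (pvSplitRec lines).2 <;>
    cases h2 : pvInsLast (PySem.Str.lower (PySem.Str.strip section_header))
        (key ++ " = " ++ value_literal ++ "\n") (pvSplitRec lines).2 <;>
      simp [*]
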